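-- pv_equiv track=rewrite | github.com/goyalayus/wordle-prime-rl-reproduction | train_sft_full_finetune.py | _assistant_spans
-- ===== SOURCE A (Python) =====
-- ASSISTANT_START = "<|im_start|>assistant\n"
--
-- ASSISTANT_END = "<|im_end|>"
--
-- def _assistant_spans(text: str) -> list[tuple[int, int]]:
--     """Find character spans of assistant content in Qwen-formatted text."""
--     spans = []
--     start_marker = ASSISTANT_START
--     end_marker = ASSISTANT_END
--     pos = 0
--     while True:
--         start = text.find(start_marker, pos)
--         if start == -1:
--             break
--         content_start = start + len(start_marker)
--         end = text.find(end_marker, content_start)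
--         if end == -1:
--             break
--         span_end = end + len(end_marker)
--         spans.append((content_start, span_end))
--         pos = span_end
--     return spans
-- ===== SOURCE B (Python) =====
-- ASSISTANT_START = "<|im_start|>assistant\n"
--
-- ASSISTANT_END = "<|im_end|>"
--
-- def _assistant_spans(text: str) -> list[tuple[int, int]]:
--     """Find character spans of assistant content in Qwen-formatted text."""
--     spans = []
--     offset = 0
--     rest = text
--     while True:
--         pre, sep, rest = rest.partition(ASSISTANT_START)
--         if not sep:
--             return spans
--         content, sep, rest = rest.partition(ASSISTANT_END)
--         if not sep:
--             return spans
--         start = offset + len(pre) + len(ASSISTANT_START)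
--         offset = start + len(content) + len(ASSISTANT_END)
--         spans.append((start, offset))
-- ===== Notes on version B (the rewrite author's own statement) =====
-- stated objective: idiomatic
-- what changed: Replaces the manual index-tracking find loop with suffix decomposition via str.partition: each step splits off the text before/after the markers and keeps a running offset, so no absolute positions are searched from.
import Mathlib
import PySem

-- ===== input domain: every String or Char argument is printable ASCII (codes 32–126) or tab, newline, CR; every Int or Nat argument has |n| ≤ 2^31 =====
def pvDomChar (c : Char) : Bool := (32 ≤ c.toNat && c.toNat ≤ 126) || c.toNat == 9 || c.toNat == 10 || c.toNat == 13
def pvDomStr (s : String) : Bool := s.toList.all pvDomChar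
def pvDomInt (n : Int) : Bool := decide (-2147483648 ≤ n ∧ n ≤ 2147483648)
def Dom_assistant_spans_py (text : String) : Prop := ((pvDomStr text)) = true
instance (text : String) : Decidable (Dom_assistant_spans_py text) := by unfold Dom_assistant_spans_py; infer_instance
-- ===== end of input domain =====

-- B replaces A's index-tracking find loop by suffix decomposition with str.partition (same cost, no absolute-index searches); return value only, neither mutates.

-- shared module constants ASSISTANT_START / ASSISTANT_END (as character lists)
def pvStartM : List Char := "<|im_start|>assistant\n".toList
def pvEndM : List Char := "<|im_end|>".toList

-- ===== PORT A =====
-- A's while-loop: pos-based text.find scanning, appending spans; fuel = length + 1 bounds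
-- the iteration count (each iteration advances pos by at least the markers' lengths).
def pvALoop (cs : List Char) (spans : List (Int × Int)) (pos : Int) : Nat → List (Int × Int)
  | 0 => spans
  | fuel + 1 =>
    let start := PySem.Chars.findFrom cs pvStartM pos none
    if start = -1 then spans
    else
      let contentStart := start + (pvStartM.length : Int)
      let e := PySem.Chars.findFrom cs pvEndM contentStart none
      if e = -1 then spans
      else
        let spanEnd := e + (pvEndM.length : Int)
        pvALoop cs (spans ++ [(contentStart, spanEnd)]) spanEnd fuel

def assistant_spans_py (text : String) : List (Int × Int) :=
  pvALoop text.toList [] 0 (text.toList.length + 1)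

-- ===== PORT B =====
-- B's while-loop over the remaining suffix: partition(m) = (take f, m, drop (f+len m)) at the
-- first occurrence f; fuel = length + 1 bounds the iteration count (each iteration drops at
-- least the markers' lengths from the suffix).
def pvBGo (rest : List Char) (offset : Int) (spans : List (Int × Int)) : Nat → List (Int × Int)
  | 0 => spans
  | fuel + 1 =>
    let f1 := PySem.Chars.find rest pvStartM
    if f1 = -1 then spans
    else
      let pre := rest.take f1.toNat
      let rest1 := rest.drop (f1.toNat + pvStartM.length)
      let f2 := PySem.Chars.find rest1 pvEndM
      if f2 = -1 then spans
      else
        let content := rest1.take f2.toNat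
        let rest2 := rest1.drop (f2.toNat + pvEndM.length)
        let start := offset + (pre.length : Int) + (pvStartM.length : Int)
        let offset' := start + (content.length : Int) + (pvEndM.length : Int)
        pvBGo rest2 offset' (spans ++ [(start, offset')]) fuel

def assistant_spans_py_alt (text : String) : List (Int × Int) :=
  pvBGo text.toList 0 [] (text.toList.length + 1)

-- ===== PRECONDITION & SPEC =====
def Spec_assistant_spans_py (text : String) (out : List (Int × Int)) : Prop := out = assistant_spans_py_alt text
instance (text : String) (out : List (Int × Int)) : Decidable (Spec_assistant_spans_py text out) := by unfold Spec_assistant_spans_py; infer_instance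

-- ===== CLAIM (what is proved, stated in full; the proofs are below) =====
def Claim_equal_assistant_spans_py : Prop := ∀ (text : String), Dom_assistant_spans_py text → Spec_assistant_spans_py text (assistant_spans_py text)

-- ===== LEMMAS AND PROOFS =====

theorem pvKey (fuel : Nat) : ∀ (cs : List Char) (k : Nat) (spans : List (Int × Int)),
    k ≤ cs.length → cs.length + 1 - k ≤ fuel →
    pvALoop cs spans (k : Int) fuel = pvBGo (cs.drop k) (k : Int) spans fuel := by
  induction fuel with
  | zero => intro cs k spans hk hf; rfl
  | succ f ih =>
    intro cs k spans hk hf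
    have h22 : pvStartM.length = 22 := rfl
    have h10 : pvEndM.length = 10 := rfl
    rw [pvALoop, pvBGo, PySem.Chars.findFrom_natCast cs pvStartM k hk]
    by_cases h1 : PySem.Chars.find (List.drop k cs) pvStartM = -1
    · simp [h1]
    · have h0 : 0 ≤ PySem.Chars.find (List.drop k cs) pvStartM := by
        have := PySem.Chars.neg_one_le_find (List.drop k cs) pvStartM; omega
      have hf1n : PySem.Chars.find (List.drop k cs) pvStartM
          = ((PySem.Chars.find (List.drop k cs) pvStartM).toNat : Int) :=
        (Int.toNat_of_nonneg h0).symm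
      have hocc := (PySem.Chars.find_spec (s := List.drop k cs) (sub := pvStartM) h0).1
      have hlen1 : pvStartM.length
          ≤ (List.drop (PySem.Chars.find (List.drop k cs) pvStartM).toNat (List.drop k cs)).length :=
        hocc.length_le
      rw [List.drop_drop, List.length_drop] at hlen1
      have hfle1 : PySem.Chars.find (List.drop k cs) pvStartM ≤ ↑(List.drop k cs).length :=
        PySem.Chars.find_le_length _ _
      rw [List.length_drop] at hfle1
      have hk2 : k + (PySem.Chars.find (List.drop k cs) pvStartM).toNat + 22 ≤ cs.length := by omega
      have hA1 : ¬((k : Int) + PySem.Chars.find (List.drop k cs) pvStartM = -1) := by omega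
      have hcs : (k : Int) + PySem.Chars.find (List.drop k cs) pvStartM + ↑pvStartM.length
          = ((k + (PySem.Chars.find (List.drop k cs) pvStartM).toNat + 22 : Nat) : Int) := by
        rw [h22]; omega
      have hd1 : List.drop ((PySem.Chars.find (List.drop k cs) pvStartM).toNat + pvStartM.length)
            (List.drop k cs)
          = List.drop (k + (PySem.Chars.find (List.drop k cs) pvStartM).toNat + 22) cs := by
        rw [List.drop_drop, h22]; congr 1
      simp only [if_neg h1, if_neg hA1, hcs, hd1,
        PySem.Chars.findFrom_natCast cs pvEndM _ hk2]
      by_cases h2 : PySem.Chars.find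
          (List.drop (k + (PySem.Chars.find (List.drop k cs) pvStartM).toNat + 22) cs) pvEndM = -1
      · simp [h2]
      · set k2 := k + (PySem.Chars.find (List.drop k cs) pvStartM).toNat + 22 with hk2def
        set f2 := PySem.Chars.find (List.drop k2 cs) pvEndM with hf2def
        have h0' : 0 ≤ f2 := by
          have := PySem.Chars.neg_one_le_find (List.drop k2 cs) pvEndM; omega
        have hf2n : f2 = (f2.toNat : Int) := (Int.toNat_of_nonneg h0').symm
        have hocc2 := (PySem.Chars.find_spec (s := List.drop k2 cs) (sub := pvEndM) h0').1
        have hlen2 : pvEndM.length ≤ (List.drop f2.toNat (List.drop k2 cs)).length :=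
          hocc2.length_le
        rw [List.drop_drop, List.length_drop] at hlen2
        have hfle2 : f2 ≤ ↑(List.drop k2 cs).length := PySem.Chars.find_le_length _ _
        rw [List.length_drop] at hfle2
        have hk3 : k2 + f2.toNat + 10 ≤ cs.length := by omega
        have hA2 : ¬((k2 : Int) + f2 = -1) := by omega
        have hse : (k2 : Int) + f2 + ↑pvEndM.length = ((k2 + f2.toNat + 10 : Nat) : Int) := by
          rw [h10]; omega
        have hd2 : List.drop (f2.toNat + pvEndM.length) (List.drop k2 cs)
            = List.drop (k2 + f2.toNat + 10) cs := by
          rw [List.drop_drop, h10]; congr 1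
        have hpre : ((List.take (PySem.Chars.find (List.drop k cs) pvStartM).toNat
            (List.drop k cs)).length : Int)
            = ↑(PySem.Chars.find (List.drop k cs) pvStartM).toNat := by
          rw [List.length_take, List.length_drop]; congr 1; omega
        have hcont : ((List.take f2.toNat (List.drop k2 cs)).length : Int) = ↑f2.toNat := by
          rw [List.length_take, List.length_drop]; congr 1; omega
        have hstartB : (k : Int) + ↑(List.take (PySem.Chars.find (List.drop k cs) pvStartM).toNat
            (List.drop k cs)).length + ↑pvStartM.length = ((k2 : Nat) : Int) := by
          rw [hpre, h22, hk2def]; push_cast; ring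
        simp only [if_neg h2, if_neg hA2, hse, hd2, hstartB, hcont]
        have hBoff : ((k2 : Nat) : Int) + ↑f2.toNat + ↑pvEndM.length
            = ((k2 + f2.toNat + 10 : Nat) : Int) := by rw [h10]; push_cast; ring
        rw [hBoff]
        exact ih cs (k2 + f2.toNat + 10) (spans ++ [((k2 : Int), ((k2 + f2.toNat + 10 : Nat) : Int))])
          hk3 (by omega)

-- ===== VERDICT (by name: the statement is the Claim_ definition above) =====
theorem assistant_spans_py_spec : Claim_equal_assistant_spans_py := by
  intro text _
  unfold Spec_assistant_spans_py assistant_spans_py assistant_spans_py_alt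
  have h := pvKey (text.toList.length + 1) text.toList 0 [] (by omega) (by omega)
  simpa using h
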